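-- pv_equiv track=rewrite | github.com/Chaebin-Kim24/python_class_SKU2024-04 | 성적확인용/숙제/4,5장/숙제_4,5장_2021304042.py | count_males_females
-- ===== SOURCE A (Python) =====
-- def count_males_females(person_list):
--     num_persons = len(person_list) // 5
--     n_male = 0
--     n_female = 0
--     for i in range(num_persons):
--         gender = person_list[i * 5 + 2]
--         if gender == 1:
--             n_male += 1
--         elif gender == 0:
--             n_female += 1
--     return n_male, n_female
-- ===== SOURCE B (Python) =====
-- def count_males_females(person_list):
--     # group into complete 5-records and take the gender column (3rd field)
--     genders = [g for _, _, g, _, _ in zip(*[iter(person_list)] * 5)]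
--     return genders.count(1), genders.count(0)
-- ===== Notes on version B (the rewrite author's own statement) =====
-- stated objective: simpler
-- what changed: Replaces the indexed range loop with per-element branch counters by grouping the list into complete 5-records, extracting the gender column, and counting 1s and 0s with list.count.
import Mathlib
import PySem

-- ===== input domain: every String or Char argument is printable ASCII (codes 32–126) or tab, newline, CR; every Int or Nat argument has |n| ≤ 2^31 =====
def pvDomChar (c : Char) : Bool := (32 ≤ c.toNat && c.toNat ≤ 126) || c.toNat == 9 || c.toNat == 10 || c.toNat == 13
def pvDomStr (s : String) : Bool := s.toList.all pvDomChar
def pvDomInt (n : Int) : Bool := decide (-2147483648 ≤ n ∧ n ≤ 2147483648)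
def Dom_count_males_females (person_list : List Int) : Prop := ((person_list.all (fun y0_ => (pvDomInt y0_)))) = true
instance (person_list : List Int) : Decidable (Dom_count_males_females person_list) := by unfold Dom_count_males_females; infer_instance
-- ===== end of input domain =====

-- B replaces A's indexed range loop with a chunked traversal collecting the gender column, then two counts; objective: simpler.
-- ===== PORT A =====
def count_males_females (person_list : List Int) : Int × Int :=
  let num_persons : Int := PySem.Int.floordiv (person_list.length : Int) 5
  (PySem.List.pyRange 0 num_persons 1).foldl
    (fun (s : Int × Int) i =>
      let gender := PySem.List.pyGetD person_list (i * 5 + 2) 0  -- index always in range (i < len//5)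
      if gender == 1 then (s.1 + 1, s.2)
      else if gender == 0 then (s.1, s.2 + 1)
      else s)
    (0, 0)

-- ===== PORT B =====
-- Source B's 5-record grouping: take the 3rd element of each complete 5-record
def pvGenders : List Int → List Int
  | _a :: _b :: c :: _d :: _e :: rest => c :: pvGenders rest
  | _ => []

def count_males_females_alt (person_list : List Int) : Int × Int :=
  let genders := pvGenders person_list
  ((genders.count 1 : Int), (genders.count 0 : Int))

-- ===== PRECONDITION & SPEC =====
def Spec_count_males_females (person_list : List Int) (out : Int × Int) : Prop := out = count_males_females_alt person_list
instance (person_list : List Int) (out : Int × Int) : Decidable (Spec_count_males_females person_list out) := by unfold Spec_count_males_females; infer_instance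

-- ===== CLAIM (what is proved, stated in full; the proofs are below) =====
def Claim_equal_count_males_females : Prop := ∀ (person_list : List Int), Dom_count_males_females person_list → Spec_count_males_females person_list (count_males_females person_list)

-- ===== LEMMAS AND PROOFS =====

theorem pv_fold_count (l : List Int) (m f : Int) :
    l.foldl (fun (s : Int × Int) g =>
      if g == 1 then (s.1 + 1, s.2) else if g == 0 then (s.1, s.2 + 1) else s) (m, f)
    = (m + l.count 1, f + l.count 0) := by
  induction l generalizing m f with
  | nil => simp
  | cons g t ih =>
    rw [List.foldl_cons]
    split_ifs with h1 h0
    · rw [ih]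
      simp only [beq_iff_eq] at h1
      simp [h1]
      omega
    · rw [ih]
      simp only [beq_iff_eq] at h0
      simp only [beq_iff_eq] at h1
      simp [h0]
      omega
    · rw [ih]
      simp only [beq_iff_eq] at h0 h1
      simp [h0, h1]

theorem pv_floordiv_nat (n : Nat) : PySem.Int.floordiv (n : Int) 5 = ((n / 5 : Nat) : Int) := by
  simp [PySem.Int.floordiv, Int.fdiv_eq_ediv]

theorem pv_map_range_genders (xs : List Int) :
    (List.range (xs.length / 5)).map (fun k : Nat => PySem.List.pyGetD xs ((k : Int) * 5 + 2) 0)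
    = pvGenders xs := by
  fun_induction pvGenders xs with
  | case1 a b c d e rest ih =>
    have hlen : (a :: b :: c :: d :: e :: rest).length / 5 = rest.length / 5 + 1 := by
      simp [List.length]; omega
    rw [hlen, List.range_succ_eq_map, List.map_cons, List.map_map]
    congr 1
    · have h2 : ((0 : Nat) : Int) * 5 + 2 = ((2 : Nat) : Int) := by norm_num
      rw [h2, PySem.List.pyGetD_natCast]
      rfl
    · rw [← ih]
      apply List.map_congr_left
      intro k _
      simp only [Function.comp_apply]
      have hc : ((k.succ : Nat) : Int) * 5 + 2 = ((k * 5 + 7 : Nat) : Int) := by push_cast; ring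
      have hc2 : ((k : Nat) : Int) * 5 + 2 = ((k * 5 + 2 : Nat) : Int) := by push_cast; ring
      rw [hc, hc2, PySem.List.pyGetD_natCast, PySem.List.pyGetD_natCast]
      simp only [show k * 5 + 7 = (k * 5 + 2) + 1 + 1 + 1 + 1 + 1 from by omega,
        List.getD_cons_succ]
  | case2 xs h =>
    have h5 : xs.length < 5 := by
      match xs, h with
      | [], _ => simp
      | [_], _ => simp
      | [_, _], _ => simp
      | [_, _, _], _ => simp
      | [_, _, _, _], _ => simp
      | a :: b :: c :: d :: e :: r, h => exact (h a b c d e r rfl).elim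
    rw [Nat.div_eq_of_lt h5]
    simp

-- ===== VERDICT (by name: the statement is the Claim_ definition above) =====
theorem count_males_females_spec : Claim_equal_count_males_females := by
  intro xs _
  unfold Spec_count_males_females count_males_females count_males_females_alt
  simp only [pv_floordiv_nat, PySem.List.pyRange_one, sub_zero, Int.toNat_natCast, zero_add,
    List.foldl_map]
  rw [show ((0 : Int), (0 : Int)) = (((0, 0) : Int × Int).1, ((0, 0) : Int × Int).2) from rfl]
  rw [← List.foldl_map (f := fun k : Nat => PySem.List.pyGetD xs ((k : Int) * 5 + 2) 0)
    (g := fun (s : Int × Int) g =>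
      if g == 1 then (s.1 + 1, s.2) else if g == 0 then (s.1, s.2 + 1) else s)]
  rw [pv_map_range_genders, pv_fold_count]
  simp
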